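-- pv_equiv track=rewrite | github.com/xxalo1/hri_rlc | deps/scripts/lock_repos.py | make_repos_distinct
-- ===== SOURCE A (Python) =====
-- from typing import Any
--
-- def make_repos_distinct(repos: dict[str, dict[str, Any]], root_paths: set[str]) -> dict[str, dict[str, Any]]:
--     """
--     Collapse duplicates (same upstream) into one entry using a deterministic rule.
--
--     Parameters
--     ----------
--     repos : dict[str, dict[str, Any]]
--         Locked repos mapping (path -> spec).
--     root_paths : set[str]
--         Paths that appeared in the root manifest.
--
--     Returns
--     -------
--     dict[str, dict[str, Any]]
--         Distinct mapping with one entry per `(type,url)`.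
--     """
--     buckets: dict[tuple[str, str], list[str]] = {}
--     for path, spec in repos.items():
--         key = (str(spec.get("type")), str(spec.get("url")))
--         buckets.setdefault(key, []).append(path)
--
--     out: dict[str, dict[str, Any]] = {}
--     for key, paths in buckets.items():
--         root_candidates = sorted(p for p in paths if p in root_paths)
--         keep_path = root_candidates[0] if root_candidates else sorted(paths)[0]
--         out[keep_path] = repos[keep_path]
--     return out
-- ===== SOURCE B (Python) =====
-- def make_repos_distinct(repos, root_paths):
--     """Single streaming pass: keep, per (type,url), the path minimal under
--     the rank (path not in root_paths, path); then emit repos[path] per kept path."""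
--     best = {}  # (type, url) -> best path so far, keyed in first-occurrence order
--     for path, spec in repos.items():
--         key = (str(spec.get("type")), str(spec.get("url")))
--         cur = best.get(key)
--         if cur is None or (path not in root_paths, path) < (cur not in root_paths, cur):
--             best[key] = path
--     return {p: repos[p] for p in best.values()}
-- ===== Notes on version B (the rewrite author's own statement) =====
-- stated objective: alternative
-- what changed: Replaces A's group-into-buckets-then-sort-each-bucket pass with a single streaming pass keeping, per (type,url) key, the path minimal under the rank (path not in root_paths, path), updating a best-path dict in place.
import Mathlib
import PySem

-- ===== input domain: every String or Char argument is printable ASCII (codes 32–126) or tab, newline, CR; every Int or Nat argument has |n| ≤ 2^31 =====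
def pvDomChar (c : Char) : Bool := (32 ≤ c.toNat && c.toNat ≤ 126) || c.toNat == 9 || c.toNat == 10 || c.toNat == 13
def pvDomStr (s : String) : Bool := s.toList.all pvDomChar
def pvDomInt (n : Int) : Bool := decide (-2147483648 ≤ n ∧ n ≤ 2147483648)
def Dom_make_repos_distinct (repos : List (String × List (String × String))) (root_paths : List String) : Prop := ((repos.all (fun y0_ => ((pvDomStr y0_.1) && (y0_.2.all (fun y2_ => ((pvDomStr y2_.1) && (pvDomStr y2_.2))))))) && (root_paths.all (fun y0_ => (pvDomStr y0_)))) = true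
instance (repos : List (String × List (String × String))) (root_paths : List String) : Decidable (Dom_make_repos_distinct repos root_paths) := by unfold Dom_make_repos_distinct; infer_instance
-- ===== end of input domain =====

-- B replaces A's group-into-buckets-then-sort-each-bucket with one streaming min-reduction
-- keeping, per (type,url), the path of smallest rank (path not in root_paths, path); return values only.

-- shared helpers (the same expressions appear verbatim in both Pythons):
-- (str(spec.get("type")), str(spec.get("url"))); str(None) = "None", str of a str is itself
def specKey (spec : List (String × String)) : String × String :=
  (((PySem.Dict.mk spec).get? "type").getD "None", ((PySem.Dict.mk spec).get? "url").getD "None")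

-- repos[p]: first-match lookup in the association list (p is always a present key here; [] is a totality default only)
def lookupRepo (repos : List (String × List (String × String))) (p : String) : List (String × String) :=
  ((PySem.Dict.mk repos).get? p).getD []

-- ===== PORT A =====
def make_repos_distinct (repos : List (String × List (String × String))) (root_paths : List String) : List (String × List (String × String)) :=
  -- buckets: for path, spec in repos.items(): buckets.setdefault(key, []).append(path)
  let buckets : PySem.Dict (String × String) (List String) :=
    repos.foldl (fun d ps =>
      d.insert (specKey ps.2) (d.getD (specKey ps.2) [] ++ [ps.1])) PySem.Dict.empty
  -- out: for key, paths in buckets.items(): …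
  let out : PySem.Dict String (List (String × String)) :=
    buckets.items.foldl (fun o kv =>
      let keep_path := match PySem.List.sorted (kv.2.filter (fun p => root_paths.contains p)) (fun x => x) false with
        | c :: _ => c
        | [] => (PySem.List.sorted kv.2 (fun x => x) false).headD ""  -- bucket lists are nonempty; headD "" is a totality guard only
      o.insert keep_path (lookupRepo repos keep_path)) PySem.Dict.empty
  out.items

-- ===== PORT B =====
-- (path not in root_paths, path) < (cur not in root_paths, cur), the tuple order spelled out lexicographically
def rankLt (root_paths : List String) (p q : String) : Bool :=
  (root_paths.contains p && !root_paths.contains q)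
    || (root_paths.contains p == root_paths.contains q && decide (p < q))

def make_repos_distinct_alt (repos : List (String × List (String × String))) (root_paths : List String) : List (String × List (String × String)) :=
  let best : PySem.Dict (String × String) String :=
    repos.foldl (fun b ps =>
      match b.get? (specKey ps.2) with
      | none => b.insert (specKey ps.2) ps.1
      | some cur => if rankLt root_paths ps.1 cur then b.insert (specKey ps.2) ps.1 else b) PySem.Dict.empty
  let out : PySem.Dict String (List (String × String)) :=
    best.items.foldl (fun o kv => o.insert kv.2 (lookupRepo repos kv.2)) PySem.Dict.empty
  out.items

-- ===== PRECONDITION & SPEC =====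
def Spec_make_repos_distinct (repos : List (String × List (String × String))) (root_paths : List String) (out : List (String × List (String × String))) : Prop := out = make_repos_distinct_alt repos root_paths
instance (repos : List (String × List (String × String))) (root_paths : List String) (out : List (String × List (String × String))) : Decidable (Spec_make_repos_distinct repos root_paths out) := by unfold Spec_make_repos_distinct; infer_instance

-- ===== CLAIM (what is proved, stated in full; the proofs are below) =====
def Claim_equal_make_repos_distinct : Prop := ∀ (repos : List (String × List (String × String))) (root_paths : List String), Dom_make_repos_distinct repos root_paths → Spec_make_repos_distinct repos root_paths (make_repos_distinct repos root_paths)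

-- ===== LEMMAS AND PROOFS =====

-- rankLt is a strict linear order on paths
lemma rankLt_irrefl (root : List String) (p : String) : rankLt root p p = false := by
  simp [rankLt]

lemma rankLt_trans {root : List String} {p q r : String}
    (h1 : rankLt root p q = true) (h2 : rankLt root q r = true) : rankLt root p r = true := by
  simp only [rankLt, Bool.or_eq_true, Bool.and_eq_true, Bool.not_eq_true', beq_iff_eq] at *
  rcases h1 with ⟨hp, hq⟩ | ⟨he, hlt⟩ <;> rcases h2 with ⟨hq', hr⟩ | ⟨he', hlt'⟩ <;> simp_all
  exact lt_trans hlt hlt'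

lemma rankLt_conn {root : List String} {p q : String}
    (h1 : rankLt root p q = false) (h2 : rankLt root q p = false) : p = q := by
  simp only [rankLt, Bool.or_eq_false_iff, Bool.and_eq_false_iff, Bool.not_eq_false',
    beq_eq_false_iff_ne, ne_eq, decide_eq_false_iff_not, not_lt] at h1 h2
  rcases h1 with ⟨c1, c2⟩; rcases h2 with ⟨d1, d2⟩
  cases hp : root.contains p <;> cases hq : root.contains q <;> simp_all
  all_goals exact String.toList_inj.mp (le_antisymm d2 c2)

lemma rankLt_eq_false_notroot_root {root : List String} {p q : String}
    (hp : root.contains p = false) (hq : root.contains q = true) : rankLt root p q = false := by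
  unfold rankLt; rw [hp, hq]; simp

lemma rankLt_eq_false_of_le {root : List String} {p q : String}
    (h : root.contains p = root.contains q) (hle : q ≤ p) : rankLt root p q = false := by
  unfold rankLt; rw [h]
  simp [not_lt.mpr hle]

-- the running minimum B maintains
def bmin (root : List String) (t : List String) (a : String) : String :=
  t.foldl (fun b p => if rankLt root p b then p else b) a

def sMin (root : List String) (l : List String) : String :=
  match l with
  | [] => ""
  | p :: t => bmin root t p

lemma bmin_mem (root : List String) (t : List String) (a : String) :
    bmin root t a = a ∨ bmin root t a ∈ t := by
  induction t generalizing a with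
  | nil => left; rfl
  | cons x t ih =>
    simp only [bmin, List.foldl_cons] at *
    by_cases h : rankLt root x a = true
    · simp only [h]
      rcases ih x with h' | h'
      · right; simp [h']
      · right; simp [h']
    · simp only [h]
      rcases ih a with h' | h'
      · left; simpa [h] using h'
      · right; simpa [h] using Or.inr h'

lemma bmin_cons (root : List String) (x : String) (t : List String) (a : String) :
    bmin root (x :: t) a = bmin root t (if rankLt root x a then x else a) := rfl

lemma bmin_isMin (root : List String) (t : List String) (a : String) :
    ∀ y, (y = a ∨ y ∈ t) → rankLt root y (bmin root t a) = false := by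
  induction t generalizing a with
  | nil =>
    rintro y (rfl | h)
    · exact rankLt_irrefl root y
    · cases h
  | cons x t ih =>
    intro y hy
    rw [bmin_cons]
    by_cases hxa : rankLt root x a = true
    · rw [if_pos hxa]
      rcases hy with rfl | hy
      · by_contra hc
        have hxm := ih x x (Or.inl rfl)
        have h1 : rankLt root y (bmin root t x) = true := by
          cases h' : rankLt root y (bmin root t x)
          · exact absurd h' hc
          · rfl
        exact absurd (rankLt_trans hxa h1) (by simp [hxm])
      · rcases List.mem_cons.mp hy with heq | hy
        · rw [heq]; exact ih x x (Or.inl rfl)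
        · exact ih x y (Or.inr hy)
    · rw [if_neg hxa]
      rcases hy with rfl | hy
      · exact ih y y (Or.inl rfl)
      · rcases List.mem_cons.mp hy with heq | hy
        · -- y = x : ¬ rankLt x a, so either a < x or a = x; either way x is not below the min
          subst heq
          by_contra hc
          have h1 : rankLt root y (bmin root t a) = true := by
            cases h' : rankLt root y (bmin root t a)
            · exact absurd h' hc
            · rfl
          have ham := ih a a (Or.inl rfl)
          by_cases hax : rankLt root a y = true
          · exact absurd (rankLt_trans hax h1) (by simp [ham])
          · have hay : a = y := rankLt_conn (by simpa using hax) (by simpa using hxa)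
            rw [← hay] at h1
            exact absurd h1 (by simp [ham])
        · exact ih a y (Or.inr hy)

lemma sMin_mem (root : List String) (l : List String) (h : l ≠ []) : sMin root l ∈ l := by
  cases l with
  | nil => exact absurd rfl h
  | cons p t =>
    rcases bmin_mem root t p with h' | h'
    · simp [sMin, h']
    · simp [sMin, h']

lemma sMin_isMin (root : List String) (l : List String) (h : l ≠ []) :
    ∀ y ∈ l, rankLt root y (sMin root l) = false := by
  cases l with
  | nil => exact absurd rfl h
  | cons p t =>
    intro y hy
    rcases List.mem_cons.mp hy with heq | hy
    · rw [heq]; exact bmin_isMin root t p p (Or.inl rfl)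
    · exact bmin_isMin root t p y (Or.inr hy)

lemma sMin_append (root : List String) (l : List String) (x : String) (h : l ≠ []) :
    sMin root (l ++ [x]) = if rankLt root x (sMin root l) then x else sMin root l := by
  cases l with
  | nil => exact absurd rfl h
  | cons p t => simp [sMin, bmin, List.foldl_append]

-- A's per-bucket choice, as a named function (identical to the inline match in the port)
def keepA (root_paths : List String) (l : List String) : String :=
  match PySem.List.sorted (l.filter (fun p => root_paths.contains p)) (fun x => x) false with
  | c :: _ => c
  | [] => (PySem.List.sorted l (fun x => x) false).headD ""

lemma sorted_head_le (l : List String) (c : String) (rest : List String)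
    (h : PySem.List.sorted l (fun x => x) false = c :: rest) (y : String) (hy : y ∈ l) : c ≤ y := by
  have hp := PySem.List.sorted_perm l (fun x => x) false
  rw [h] at hp
  rcases List.mem_iff_getElem.mp (hp.mem_iff.mpr hy) with ⟨i, hi, hyi⟩
  have hm := PySem.List.sorted_id_getElem_mono (xs := l) (p := 0) (q := i) (by omega) (by rw [h]; exact hi)
  simp only [h] at hm
  simpa [hyi] using hm

lemma keepA_spec (root : List String) (l : List String) (h : l ≠ []) :
    keepA root l ∈ l ∧ ∀ y ∈ l, rankLt root y (keepA root l) = false := by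
  unfold keepA
  cases hs : PySem.List.sorted (l.filter (fun p => root.contains p)) (fun x => x) false with
  | cons c rest =>
    have hperm := PySem.List.sorted_perm (l.filter (fun p => root.contains p)) (fun x => x) false
    rw [hs] at hperm
    have hcf : c ∈ l.filter (fun p => root.contains p) := hperm.mem_iff.mp (List.mem_cons_self ..)
    have hcl : c ∈ l := List.mem_of_mem_filter hcf
    have hcr : root.contains c = true := List.of_mem_filter hcf
    show c ∈ l ∧ ∀ y ∈ l, rankLt root y c = false
    refine ⟨hcl, fun y hy => ?_⟩
    cases hyr : root.contains y
    · exact rankLt_eq_false_notroot_root hyr hcr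
    · have hyf : y ∈ l.filter (fun p => root.contains p) := List.mem_filter.mpr ⟨hy, hyr⟩
      have hle : c ≤ y := sorted_head_le _ c rest hs y hyf
      exact rankLt_eq_false_of_le (by rw [hyr, hcr]) hle
  | nil =>
    have hf : l.filter (fun p => root.contains p) = [] := by
      rwa [PySem.List.sorted_eq_nil_iff] at hs
    have hnr : ∀ y ∈ l, root.contains y = false := by
      intro y hy
      by_contra hc
      have : y ∈ l.filter (fun p => root.contains p) :=
        List.mem_filter.mpr ⟨hy, by simpa using hc⟩
      rw [hf] at this
      simp at this
    cases hs2 : PySem.List.sorted l (fun x => x) false with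
    | nil => exact absurd (by rwa [PySem.List.sorted_eq_nil_iff] at hs2) h
    | cons c rest =>
      have hperm := PySem.List.sorted_perm l (fun x => x) false
      rw [hs2] at hperm
      have hcl : c ∈ l := hperm.mem_iff.mp (List.mem_cons_self ..)
      show c ∈ l ∧ ∀ y ∈ l, rankLt root y c = false
      refine ⟨hcl, fun y hy => ?_⟩
      have hle : c ≤ y := sorted_head_le l c rest hs2 y hy
      exact rankLt_eq_false_of_le (by rw [hnr y hy, hnr c hcl]) hle

lemma keepA_eq_sMin (root : List String) (l : List String) (h : l ≠ []) :
    keepA root l = sMin root l := by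
  obtain ⟨hk_mem, hk_min⟩ := keepA_spec root l h
  exact rankLt_conn (sMin_isMin root l h _ hk_mem) (hk_min _ (sMin_mem root l h))

-- lookups through the value-mapped items list
lemma get?_mk_map (g : List String → String) (l : List ((String × String) × List String))
    (k : String × String) :
    (PySem.Dict.mk (l.map (fun kv => (kv.1, g kv.2)))).get? k
      = ((PySem.Dict.mk l).get? k).map g := by
  induction l with
  | nil => rfl
  | cons a t ih =>
    simp only [List.map_cons]
    rw [PySem.Dict.get?_mk_cons, PySem.Dict.get?_mk_cons]
    by_cases hk : a.1 == k
    · simp [hk]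
    · simp [hk, ih]

-- the streaming invariant: B's dict is always A's buckets with each bucket collapsed to its rank-minimum
lemma stream_inv (root : List String) (repos : List (String × List (String × String))) :
    ∀ (d : PySem.Dict (String × String) (List String)),
      d.keys.Nodup → (∀ kv ∈ d.items, kv.2 ≠ []) →
      (repos.foldl (fun b ps =>
          match b.get? (specKey ps.2) with
          | none => b.insert (specKey ps.2) ps.1
          | some cur => if rankLt root ps.1 cur then b.insert (specKey ps.2) ps.1 else b)
        (PySem.Dict.mk (d.items.map (fun kv => (kv.1, sMin root kv.2)))))
        = PySem.Dict.mk ((repos.foldl (fun d ps =>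
            d.insert (specKey ps.2) (d.getD (specKey ps.2) [] ++ [ps.1])) d).items.map
              (fun kv => (kv.1, sMin root kv.2)))
      ∧ (repos.foldl (fun d ps =>
            d.insert (specKey ps.2) (d.getD (specKey ps.2) [] ++ [ps.1])) d).keys.Nodup
      ∧ ∀ kv ∈ (repos.foldl (fun d ps =>
            d.insert (specKey ps.2) (d.getD (specKey ps.2) [] ++ [ps.1])) d).items, kv.2 ≠ [] := by
  induction repos with
  | nil => intro d hnd hne; exact ⟨rfl, hnd, hne⟩
  | cons ps rest ih =>
    intro d hnd hne
    obtain ⟨l0⟩ := d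
    simp only [List.foldl_cons]
    have hstep : (match (PySem.Dict.mk (List.map (fun kv : (String × String) × List String => (kv.1, sMin root kv.2)) l0)).get? (specKey ps.2) with
          | none => (PySem.Dict.mk (List.map (fun kv : (String × String) × List String => (kv.1, sMin root kv.2)) l0)).insert (specKey ps.2) ps.1
          | some cur => if rankLt root ps.1 cur then (PySem.Dict.mk (List.map (fun kv : (String × String) × List String => (kv.1, sMin root kv.2)) l0)).insert (specKey ps.2) ps.1
                        else (PySem.Dict.mk (List.map (fun kv : (String × String) × List String => (kv.1, sMin root kv.2)) l0)))
        = PySem.Dict.mk ((((PySem.Dict.mk l0).insert (specKey ps.2)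
            ((PySem.Dict.mk l0).getD (specKey ps.2) [] ++ [ps.1])).items).map
              (fun kv => (kv.1, sMin root kv.2))) := by
      cases hget : (PySem.Dict.mk l0).get? (specKey ps.2) with
      | some paths =>
        have hmem := PySem.Dict.mem_items_of_get?_eq_some _ hget
        have hpne : paths ≠ [] := hne _ hmem
        have hcont : (PySem.Dict.mk l0).contains (specKey ps.2) = true := by
          rw [PySem.Dict.contains_eq_isSome_get?, hget]; rfl
        have hbget : (PySem.Dict.mk (List.map (fun kv => (kv.1, sMin root kv.2)) l0)).get? (specKey ps.2)
            = some (sMin root paths) := by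
          rw [get?_mk_map, hget]; rfl
        have hbcont : (PySem.Dict.mk (List.map (fun kv => (kv.1, sMin root kv.2)) l0)).contains (specKey ps.2) = true := by
          rw [PySem.Dict.contains_eq_isSome_get?, hbget]; rfl
        rw [PySem.Dict.getD_of_get?_eq_some _ _ hget, hbget]
        show (if rankLt root ps.1 (sMin root paths) then _ else _) = _
        by_cases hrank : rankLt root ps.1 (sMin root paths) = true
        · rw [if_pos hrank]
          apply PySem.Dict.ext
          rw [PySem.Dict.items_insert_of_contains _ _ hbcont,
              PySem.Dict.items_insert_of_contains _ _ hcont, List.map_map, List.map_map]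
          apply List.map_congr_left
          intro p hp
          by_cases hpk : (p.1 == specKey ps.2) = true
          · have hkey : p.1 = specKey ps.2 := eq_of_beq hpk
            simp [hkey, sMin_append root paths ps.1 hpne, hrank]
          · have hpk' : p.1 ≠ specKey ps.2 := by simpa using hpk
            simp [hpk']
        · rw [if_neg hrank]
          apply PySem.Dict.ext
          rw [PySem.Dict.items_insert_of_contains _ _ hcont, List.map_map]
          show List.map (fun kv => (kv.1, sMin root kv.2)) l0 = _
          apply List.map_congr_left
          intro p hp
          by_cases hpk : (p.1 == specKey ps.2) = true
          · have hkey : p.1 = specKey ps.2 := eq_of_beq hpk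
            have hp2 : paths = p.2 := by
              have := PySem.Dict.get?_of_mem_items (PySem.Dict.mk l0)
                (k := p.1) (v := p.2) (by simpa using hp) hnd
              rw [hkey, hget] at this
              exact Option.some.inj this
            simp [hkey, ← hp2, sMin_append root paths ps.1 hpne, hrank]
          · have hpk' : p.1 ≠ specKey ps.2 := by simpa using hpk
            simp [hpk']
      | none =>
        have hcont : (PySem.Dict.mk l0).contains (specKey ps.2) = false := by
          rw [PySem.Dict.contains_eq_isSome_get?, hget]; rfl
        have hbget : (PySem.Dict.mk (List.map (fun kv => (kv.1, sMin root kv.2)) l0)).get? (specKey ps.2)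
            = none := by
          rw [get?_mk_map, hget]; rfl
        have hbcont : (PySem.Dict.mk (List.map (fun kv => (kv.1, sMin root kv.2)) l0)).contains (specKey ps.2) = false := by
          rw [PySem.Dict.contains_eq_isSome_get?, hbget]; rfl
        rw [hbget]
        show (PySem.Dict.mk (List.map (fun kv : (String × String) × List String => (kv.1, sMin root kv.2)) l0)).insert (specKey ps.2) ps.1 = _
        apply PySem.Dict.ext
        rw [PySem.Dict.items_insert_of_not_contains _ _ hbcont,
            PySem.Dict.items_insert_of_not_contains _ _ hcont,
            PySem.Dict.getD_of_get?_eq_none _ _ hget, List.map_append]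
        rfl
    have hnd' : (((PySem.Dict.mk l0).insert (specKey ps.2)
        ((PySem.Dict.mk l0).getD (specKey ps.2) [] ++ [ps.1]))).keys.Nodup :=
      PySem.Dict.nodup_keys_insert _ _ _ hnd
    have hne' : ∀ kv ∈ (((PySem.Dict.mk l0).insert (specKey ps.2)
        ((PySem.Dict.mk l0).getD (specKey ps.2) [] ++ [ps.1]))).items, kv.2 ≠ [] := by
      intro kv hkv
      rcases (PySem.Dict.mem_items_insert _ _ _ _).mp hkv with rfl | ⟨hkv', _⟩
      · simp
      · exact hne _ hkv'
    rw [hstep]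
    exact ih _ hnd' hne'

-- ===== VERDICT (by name: the statement is the Claim_ definition above) =====
theorem make_repos_distinct_spec : Claim_equal_make_repos_distinct := by
  intro repos root_paths _h
  unfold Spec_make_repos_distinct make_repos_distinct make_repos_distinct_alt
  obtain ⟨hb, hnd, hne⟩ := stream_inv root_paths repos PySem.Dict.empty
    (by simp) (by intro kv h; exact absurd h (List.not_mem_nil))
  have hb2 : (repos.foldl (fun b ps =>
        match b.get? (specKey ps.2) with
        | none => b.insert (specKey ps.2) ps.1
        | some cur => if rankLt root_paths ps.1 cur then b.insert (specKey ps.2) ps.1 else b)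
      PySem.Dict.empty)
      = PySem.Dict.mk (((repos.foldl (fun d ps =>
          d.insert (specKey ps.2) (d.getD (specKey ps.2) [] ++ [ps.1])) PySem.Dict.empty).items).map
            (fun kv : (String × String) × List String => (kv.1, sMin root_paths kv.2))) := hb
  dsimp only
  rw [hb2]
  show (((repos.foldl (fun d ps =>
        d.insert (specKey ps.2) (d.getD (specKey ps.2) [] ++ [ps.1])) PySem.Dict.empty).items).foldl
          (fun o kv =>
            o.insert (keepA root_paths kv.2) (lookupRepo repos (keepA root_paths kv.2)))
          PySem.Dict.empty).items
    = ((((repos.foldl (fun d ps =>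
        d.insert (specKey ps.2) (d.getD (specKey ps.2) [] ++ [ps.1])) PySem.Dict.empty).items).map
          (fun kv : (String × String) × List String => (kv.1, sMin root_paths kv.2))).foldl
          (fun o kv => o.insert kv.2 (lookupRepo repos kv.2)) PySem.Dict.empty).items
  rw [List.foldl_map]
  apply congrArg PySem.Dict.items
  apply PySem.List.foldl_congr_mem
  intro acc kv hkv
  rw [keepA_eq_sMin root_paths kv.2 (hne kv hkv)]
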